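-- pv_equiv track=rewrite | github.com/fatestapestry/avrae-collections | collection/LOTR 5E/module/lotr_utils_bf283fd7-585d-4530-b0e2-9e03eb643a96.py | get_flaws_until
-- ===== SOURCE A (Python) =====
-- def get_flaws_until(path_flaws, target_flaw):
--     """Gets list of flaws up to and including target flaw"""
--     if not target_flaw:
--         return []
--
--     flaws = []
--     for flaw in path_flaws:
--         flaws.append(flaw)
--         if flaw == target_flaw:
--             break
--     return flaws
-- ===== SOURCE B (Python) =====
-- def get_flaws_until(path_flaws, target_flaw):
--     """Gets list of flaws up to and including target flaw"""
--     if not target_flaw: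
--         return []
--     try:
--         idx = path_flaws.index(target_flaw)
--         return list(path_flaws[:idx + 1])
--     except ValueError:
--         return list(path_flaws)
-- ===== Notes on version B (the rewrite author's own statement) =====
-- stated objective: simpler
-- what changed: Replaced the accumulate-and-break scan with a find-then-slice decomposition: locate the target with list.index and return the prefix slice, or the whole list when the target is absent.
import Mathlib
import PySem

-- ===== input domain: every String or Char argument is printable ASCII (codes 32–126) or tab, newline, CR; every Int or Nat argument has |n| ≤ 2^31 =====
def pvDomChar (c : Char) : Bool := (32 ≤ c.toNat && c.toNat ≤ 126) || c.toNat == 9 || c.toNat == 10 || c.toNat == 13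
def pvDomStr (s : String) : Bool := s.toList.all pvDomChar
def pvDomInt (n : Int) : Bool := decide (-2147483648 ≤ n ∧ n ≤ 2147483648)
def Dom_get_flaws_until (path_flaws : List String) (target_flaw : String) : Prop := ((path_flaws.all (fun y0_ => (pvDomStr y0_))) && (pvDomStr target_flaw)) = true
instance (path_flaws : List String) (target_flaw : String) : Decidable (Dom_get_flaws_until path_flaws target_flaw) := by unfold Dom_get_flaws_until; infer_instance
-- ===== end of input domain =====

-- B replaces A's accumulate-and-break loop with a find-then-slice decomposition (simpler); return value only.
-- ===== PORT A =====
-- the for-loop with append and break, as structural recursion over path_flaws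
def pvLoopA : List String → String → List String
  | [], _ => []
  | flaw :: rest, t => flaw :: (if flaw == t then [] else pvLoopA rest t)

def get_flaws_until (path_flaws : List String) (target_flaw : String) : List String :=
  if target_flaw = "" then []   -- `if not target_flaw`
  else pvLoopA path_flaws target_flaw

-- ===== PORT B =====
def get_flaws_until_alt (path_flaws : List String) (target_flaw : String) : List String :=
  if target_flaw = "" then []
  else
    match PySem.List.index? path_flaws target_flaw with   -- path_flaws.index(target_flaw)
    | some idx => PySem.List.slice path_flaws none (some ((idx : Int) + 1))   -- path_flaws[:idx+1]
    | none => path_flaws   -- except ValueError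

-- ===== PRECONDITION & SPEC =====
def Spec_get_flaws_until (path_flaws : List String) (target_flaw : String) (out : List String) : Prop := out = get_flaws_until_alt path_flaws target_flaw
instance (path_flaws : List String) (target_flaw : String) (out : List String) : Decidable (Spec_get_flaws_until path_flaws target_flaw out) := by unfold Spec_get_flaws_until; infer_instance

-- ===== CLAIM (what is proved, stated in full; the proofs are below) =====
def Claim_equal_get_flaws_until : Prop := ∀ (path_flaws : List String) (target_flaw : String), Dom_get_flaws_until path_flaws target_flaw → Spec_get_flaws_until path_flaws target_flaw (get_flaws_until path_flaws target_flaw)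

-- ===== LEMMAS AND PROOFS =====

-- ===== VERDICT (by name: the statement is the Claim_ definition above) =====
theorem pvLoopA_eq (t : String) (pf : List String) :
    pvLoopA pf t = (match PySem.List.index? pf t with
      | some i => pf.take (i + 1)
      | none => pf) := by
  induction pf with
  | nil => simp [pvLoopA, PySem.List.index?]
  | cons f rest ih =>
    by_cases hf : f = t
    · subst hf
      rw [PySem.List.index?_cons_self]
      simp [pvLoopA]
    · rw [PySem.List.index?_cons_of_ne rest hf]
      cases h : PySem.List.index? rest t with
      | none =>
        rw [PySem.List.index?_eq_idxOf?] at h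
        simp [pvLoopA, hf, ih, h]
      | some i =>
        rw [PySem.List.index?_eq_idxOf?] at h
        simp [pvLoopA, hf, ih, h, List.take]

theorem get_flaws_until_spec : Claim_equal_get_flaws_until := by
  intro pf t _
  unfold Spec_get_flaws_until get_flaws_until get_flaws_until_alt
  split
  · rfl
  · rw [pvLoopA_eq]
    cases h : PySem.List.index? pf t with
    | none => rfl
    | some i =>
      show pf.take (i + 1) = PySem.List.slice pf none (some ((i : Int) + 1))
      have hc : ((i : Int) + 1) = ((i + 1 : Nat) : Int) := by push_cast; ring
      rw [hc, PySem.List.slice_to_natCast]
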